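-- pv_equiv track=rewrite | github.com/Hima9791/New_ACC | utils/unit_utils.py | process_unit_token_no_paren
-- ===== SOURCE A (Python) =====
-- def process_unit_token_no_paren(token, base_units, multipliers_dict):
--     """
--     Processes a unit token (without parentheses) by checking for built-in
--     units or known multiplier prefixes.
--     """
--     token = token.strip()
--     if token.startswith('$'):
--         after_dollar = token[1:]
--         # Check if there is a space right after "$"
--         has_space = after_dollar.startswith(" ")
--         stripped = after_dollar.strip()
--         if stripped == "":
--             return "$ " if has_space else "$"
--         if stripped in base_units:
--             return "$ " + stripped if has_space else "$" + stripped
--         sorted_prefixes = sorted(multipliers_dict.keys(), key=len, reverse=True)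
--         for prefix in sorted_prefixes:
--             if stripped.startswith(prefix):
--                 possible_base = stripped[len(prefix):]
--                 if possible_base in base_units:
--                     return "$ " + possible_base if has_space else "$" + possible_base
--         return f"Error: Undefined unit '{stripped}' (no recognized prefix)"
--     else:
--         stripped_token = token.strip()
--         if stripped_token in base_units:
--             return "$" + stripped_token
--         sorted_prefixes = sorted(multipliers_dict.keys(), key=len, reverse=True)
--         for prefix in sorted_prefixes:
--             if stripped_token.startswith(prefix):
--                 possible_base = stripped_token[len(prefix):]
--                 if possible_base in base_units:
--                     return "$" + possible_base
--         return f"Error: Undefined unit '{stripped_token}' (no recognized prefix)"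
-- ===== SOURCE B (Python) =====
-- def process_unit_token_no_paren(token, base_units, multipliers_dict):
--     """Resolve a unit token to '$'+base by trying only the distinct prefix
--     lengths (longest first), with set lookups for prefix and remainder."""
--     token = token.strip()
--     if token.startswith('$'):
--         rest = token[1:]
--         lead = "$ " if rest.startswith(" ") else "$"
--         core = rest.strip()
--         if core == "":
--             return lead
--     else:
--         lead = "$"
--         core = token
--     bases = set(base_units)
--     if core in bases:
--         return lead + core
--     prefixes = set(multipliers_dict.keys())
--     nc = len(core)
--     for k in sorted({len(p) for p in prefixes if len(p) <= nc}, reverse=True):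
--         if core[:k] in prefixes and core[k:] in bases:
--             return lead + core[k:]
--     return f"Error: Undefined unit '{core}' (no recognized prefix)"
-- ===== Notes on version B (the rewrite author's own statement) =====
-- stated objective: alternative
-- what changed: Instead of sorting all multiplier prefixes by length and scanning them with startswith, B iterates only the distinct prefix lengths (longest first) over the token's split positions and tests each prefix/remainder pair with set lookups.
import Mathlib
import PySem

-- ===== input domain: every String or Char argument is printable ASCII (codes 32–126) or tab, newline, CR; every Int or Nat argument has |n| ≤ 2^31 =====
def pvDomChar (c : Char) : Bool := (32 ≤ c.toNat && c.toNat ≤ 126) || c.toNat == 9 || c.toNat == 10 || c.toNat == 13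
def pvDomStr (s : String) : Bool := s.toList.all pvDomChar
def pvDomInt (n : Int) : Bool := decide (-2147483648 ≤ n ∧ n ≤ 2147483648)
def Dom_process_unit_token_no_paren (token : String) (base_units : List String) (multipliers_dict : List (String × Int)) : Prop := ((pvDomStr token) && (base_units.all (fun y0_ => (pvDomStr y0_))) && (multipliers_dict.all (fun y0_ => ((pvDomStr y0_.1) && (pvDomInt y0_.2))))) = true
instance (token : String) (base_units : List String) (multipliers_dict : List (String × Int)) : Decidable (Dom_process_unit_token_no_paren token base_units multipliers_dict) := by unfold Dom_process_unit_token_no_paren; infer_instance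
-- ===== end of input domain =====

-- B replaces A's sort-all-prefixes-then-startswith scan by a scan over the distinct
-- prefix lengths (longest first) with set lookups (objective: alternative; A = B is proved).

-- shared by both ports: the f-string error message
def pvErr (s : List Char) : String :=
  String.ofList ("Error: Undefined unit '".toList ++ s ++ "' (no recognized prefix)".toList)

-- ===== PORT A =====
-- A's inner loop: first prefix in the (length-descending) list whose remainder is a base unit
def pvLoopA (stripped : List Char) (bu : List (List Char)) : List (List Char) → Option (List Char)
  | [] => none
  | p :: rest =>
    if PySem.Chars.startswith stripped p then
      let possible_base := PySem.List.slice stripped (some (PySem.Chars.len p)) none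
      if bu.contains possible_base then some possible_base
      else pvLoopA stripped bu rest
    else pvLoopA stripped bu rest

-- sorted(multipliers_dict.keys(), key=len, reverse=True) (keys read as char lists)
def pvSortedPrefixes (md : List (String × Int)) : List (List Char) :=
  PySem.List.sorted ((PySem.Dict.ofList md).keys.map String.toList) (fun p => PySem.Chars.len p) true

def process_unit_token_no_paren (token : String) (base_units : List String) (multipliers_dict : List (String × Int)) : String :=
  let bu := base_units.map String.toList
  let tok := PySem.Chars.strip token.toList
  if PySem.Chars.startswith tok ['$'] then
    let after_dollar := PySem.List.slice tok (some 1) none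
    let has_space := PySem.Chars.startswith after_dollar [' ']
    let stripped := PySem.Chars.strip after_dollar
    if stripped = [] then (if has_space then "$ " else "$")
    else if bu.contains stripped then
      (if has_space then String.ofList ("$ ".toList ++ stripped)
       else String.ofList ("$".toList ++ stripped))
    else
      match pvLoopA stripped bu (pvSortedPrefixes multipliers_dict) with
      | some pb =>
          if has_space then String.ofList ("$ ".toList ++ pb)
          else String.ofList ("$".toList ++ pb)
      | none => pvErr stripped
  else
    let stripped_token := PySem.Chars.strip tok
    if bu.contains stripped_token then String.ofList ("$".toList ++ stripped_token)
    else
      match pvLoopA stripped_token bu (pvSortedPrefixes multipliers_dict) with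
      | some pb => String.ofList ("$".toList ++ pb)
      | none => pvErr stripped_token

-- ===== PORT B =====
-- B's loop: candidate split positions (the distinct prefix lengths, longest first),
-- set lookups for prefix and remainder
def pvLoopB (core : List Char) (prefixes bases : PySem.Set (List Char)) : List Nat → Option (List Char)
  | [] => none
  | k :: rest =>
    if prefixes.contains (core.take k) && bases.contains (core.drop k) then some (core.drop k)
    else pvLoopB core prefixes bases rest

-- sorted({len(p) for p in prefixes if len(p) <= nc}, reverse=True)
def pvLens (core : List Char) (prefixes : PySem.Set (List Char)) : List Nat :=
  PySem.List.sorted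
    (PySem.Set.ofList ((prefixes.filter (fun p => p.length ≤ core.length)).map List.length))
    (fun k => k) true

def pvResolveB (lead core : List Char) (base_units : List String) (md : List (String × Int)) : String :=
  let bases : PySem.Set (List Char) := PySem.Set.ofList (base_units.map String.toList)
  if bases.contains core then String.ofList (lead ++ core)
  else
    let prefixes : PySem.Set (List Char) := PySem.Set.ofList ((PySem.Dict.ofList md).keys.map String.toList)
    match pvLoopB core prefixes bases (pvLens core prefixes) with
    | some rem => String.ofList (lead ++ rem)
    | none => pvErr core

def process_unit_token_no_paren_alt (token : String) (base_units : List String) (multipliers_dict : List (String × Int)) : String :=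
  let tok := PySem.Chars.strip token.toList
  if PySem.Chars.startswith tok ['$'] then
    let rest := PySem.List.slice tok (some 1) none
    let lead := if PySem.Chars.startswith rest [' '] then "$ ".toList else "$".toList
    let core := PySem.Chars.strip rest
    if core = [] then String.ofList lead
    else pvResolveB lead core base_units multipliers_dict
  else pvResolveB "$".toList tok base_units multipliers_dict

-- ===== PRECONDITION & SPEC =====
def Spec_process_unit_token_no_paren (token : String) (base_units : List String) (multipliers_dict : List (String × Int)) (out : String) : Prop := out = process_unit_token_no_paren_alt token base_units multipliers_dict
instance (token : String) (base_units : List String) (multipliers_dict : List (String × Int)) (out : String) : Decidable (Spec_process_unit_token_no_paren token base_units multipliers_dict out) := by unfold Spec_process_unit_token_no_paren; infer_instance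

-- ===== CLAIM (what is proved, stated in full; the proofs are below) =====
def Claim_equal_process_unit_token_no_paren : Prop := ∀ (token : String) (base_units : List String) (multipliers_dict : List (String × Int)), Dom_process_unit_token_no_paren token base_units multipliers_dict → Spec_process_unit_token_no_paren token base_units multipliers_dict (process_unit_token_no_paren token base_units multipliers_dict)

-- ===== LEMMAS AND PROOFS =====

-- `dropWhile` is idempotent
theorem pv_dropWhile_idem {α : Type} (p : α → Bool) (l : List α) :
    List.dropWhile p (List.dropWhile p l) = List.dropWhile p l := by
  induction l with
  | nil => rfl
  | cons a t ih => by_cases h : p a <;> simp [h, ih]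

-- strip is idempotent (A strips the non-dollar token a second time; B does not)
theorem pv_strip_strip (s : List Char) :
    PySem.Chars.strip (PySem.Chars.strip s) = PySem.Chars.strip s := by
  simp only [PySem.Chars.strip, PySem.Chars.lstrip, PySem.Chars.rstrip]
  set p := PySem.Chars.isspace
  set x := List.dropWhile p s with hx
  set y := (List.dropWhile p x.reverse).reverse with hy
  have hyx : y <+: x := by
    have := (List.dropWhile_suffix (l := x.reverse) p).reverse
    simpa [hy] using this
  have hlx : List.dropWhile p y = y := by
    rw [List.dropWhile_eq_self_iff]
    intro hl
    have hx0 : y[0] = x[0]'(by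
        have := hyx.length_le
        omega) := hyx.getElem hl
    have hxself : List.dropWhile p x = x := by rw [hx]; exact pv_dropWhile_idem p s
    have := List.dropWhile_eq_self_iff.1 hxself (by
      have := hyx.length_le
      omega)
    rw [hx0]; exact this
  rw [hlx, hy, List.reverse_reverse, pv_dropWhile_idem]

-- A's loop is "first match of the filter"
theorem pvLoopA_eq_filter (cs : List Char) (bu : List (List Char)) (L : List (List Char)) :
    pvLoopA cs bu L =
      ((L.filter (fun p => PySem.Chars.startswith cs p && bu.contains (cs.drop p.length))).head?).map
        (fun p => cs.drop p.length) := by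
  induction L with
  | nil => rfl
  | cons p rest ih =>
    by_cases hs : PySem.Chars.startswith cs p
    · have hslice : PySem.List.slice cs (some (PySem.Chars.len p)) none = cs.drop p.length := by
        rw [PySem.Chars.len_eq, PySem.List.slice_from_natCast]
      by_cases hc : cs.drop p.length ∈ bu
      · simp [pvLoopA, hs, hc]
      · simp [pvLoopA, hs, hc, ih]
    · simp [pvLoopA, hs, ih]

-- B's loop is "first match of the filter" over the candidate list
theorem pvLoopB_eq (cs : List Char) (S T : PySem.Set (List Char)) (lens : List Nat) :
    pvLoopB cs S T lens =
      ((lens.filter (fun j => S.contains (cs.take j) && T.contains (cs.drop j))).head?).map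
        (fun j => cs.drop j) := by
  induction lens with
  | nil => rfl
  | cons k rest ih =>
    by_cases h1 : cs.take k ∈ S <;> by_cases h2 : cs.drop k ∈ T <;>
      simp [pvLoopB, h1, h2, ih]

-- pairwise ≥ + "equal key ⇒ equal element" + nodup gives pairwise >
theorem pv_pairwise_strict {α : Type} (f : α → Nat) (l : List α)
    (h1 : l.Pairwise (fun a b => f b ≤ f a)) (h2 : l.Nodup)
    (h3 : ∀ a ∈ l, ∀ b ∈ l, f a = f b → a = b) :
    l.Pairwise (fun a b => f b < f a) := by
  induction l with
  | nil => exact List.Pairwise.nil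
  | cons a t ih =>
    rcases List.pairwise_cons.1 h1 with ⟨ha, ht⟩
    rcases List.nodup_cons.1 h2 with ⟨hna, hnt⟩
    refine List.pairwise_cons.2 ⟨?_, ih ht hnt (fun x hx y hy => h3 x (.tail _ hx) y (.tail _ hy))⟩
    intro b hb
    have hle := ha b hb
    rcases lt_or_eq_of_le hle with h | h
    · exact h
    · exact absurd (h3 a (.head _) b (.tail _ hb) h.symm).symm (fun e => hna (e ▸ hb))

-- Set.ofList membership test equals the raw list's membership test
theorem pv_contains_ofList {α : Type} [BEq α] [LawfulBEq α] (xs : List α) (y : α) :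
    (PySem.Set.ofList xs).contains y = xs.contains y := by
  by_cases h : y ∈ xs
  · have h1 : (PySem.Set.ofList xs).contains y = true :=
      (PySem.Set.contains_iff _ _).2 ((PySem.Set.mem_ofList xs y).2 h)
    simp
  · have h1 : ¬ (PySem.Set.ofList xs).contains y = true := by
      intro hc; exact h ((PySem.Set.mem_ofList xs y).1 ((PySem.Set.contains_iff _ _).1 hc))
    simp at h1
    simp [h1]

-- the heart: A's sorted-prefix scan equals B's descending split-position scan
theorem pv_loops_agree (cs : List Char) (bu : List String) (md : List (String × Int)) :
    pvLoopA cs (bu.map String.toList) (pvSortedPrefixes md) =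
      pvLoopB cs (PySem.Set.ofList ((PySem.Dict.ofList md).keys.map String.toList))
        (PySem.Set.ofList (bu.map String.toList))
        (pvLens cs (PySem.Set.ofList ((PySem.Dict.ofList md).keys.map String.toList))) := by
  classical
  set buL := bu.map String.toList with hbuL
  set keysL := (PySem.Dict.ofList md).keys.map String.toList with hkeysL
  set n := cs.length with hn
  set Q : List Char → Bool := fun p => PySem.Chars.startswith cs p && buL.contains (cs.drop p.length) with hQ
  set P : Nat → Bool := fun j =>
    (PySem.Set.ofList keysL).contains (cs.take j) && (PySem.Set.ofList buL).contains (cs.drop j) with hP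
  set L := pvSortedPrefixes md with hL
  set F := L.filter Q with hF
  set lens := pvLens cs (PySem.Set.ofList keysL) with hlens
  set G := lens.filter P with hG
  -- members of F are prefixes of cs
  have hFpre : ∀ p ∈ F, p <+: cs := by
    intro p hp
    have h2 := (List.mem_filter.1 (hF ▸ hp)).2
    rw [hQ] at h2
    simp only [Bool.and_eq_true] at h2
    exact (PySem.Chars.startswith_iff cs p).1 h2.1
  -- keysL has no duplicates
  have hkeys_nodup : keysL.Nodup := by
    rw [hkeysL]
    exact (PySem.Dict.nodup_keys_ofList md).map (fun a b h => String.toList_inj.1 h)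
  have hLnodup : L.Nodup := by
    have hperm := PySem.List.sorted_perm ((PySem.Dict.ofList md).keys.map String.toList)
      (fun p => PySem.Chars.len p) true
    exact hperm.nodup_iff.2 hkeys_nodup
  have hLmem : ∀ p, p ∈ L ↔ p ∈ keysL := fun p =>
    PySem.List.mem_sorted ((PySem.Dict.ofList md).keys.map String.toList)
      (fun p => PySem.Chars.len p) true p
  -- F strictly descending in length
  have hFstrict : F.Pairwise (fun a b => b.length < a.length) := by
    apply pv_pairwise_strict
    · have hLpair : L.Pairwise (fun a b => PySem.Chars.len b ≤ PySem.Chars.len a) :=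
        PySem.List.sorted_pairwise_rev _ _
      have : L.Pairwise (fun a b => b.length ≤ a.length) := by
        refine hLpair.imp ?_
        intro a b h
        simp only [PySem.Chars.len_eq] at h
        exact_mod_cast h
      exact this.filter Q
    · exact hLnodup.filter Q
    · intro a ha b hb hlen
      have h1 := List.prefix_iff_eq_take.1 (hFpre a ha)
      have h2 := List.prefix_iff_eq_take.1 (hFpre b hb)
      rw [h1, h2, hlen]
  have hlens_mem : ∀ j, j ∈ lens ↔ ∃ p ∈ keysL, p.length ≤ n ∧ p.length = j := by
    intro j
    rw [hlens]
    unfold pvLens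
    rw [PySem.List.mem_sorted, PySem.Set.mem_ofList, List.mem_map]
    constructor
    · rintro ⟨p, hp, rfl⟩
      rcases List.mem_filter.1 hp with ⟨hp1, hp2⟩
      exact ⟨p, (PySem.Set.mem_ofList _ _).1 hp1, by simpa [hn] using hp2, rfl⟩
    · rintro ⟨p, hp, hle, rfl⟩
      exact ⟨p, List.mem_filter.2 ⟨(PySem.Set.mem_ofList _ _).2 hp, by simpa [hn] using hle⟩, rfl⟩
  have hGstrict : G.Pairwise (fun a b => b < a) := by
    rw [hG]
    have hpw : lens.Pairwise (fun a b => b ≤ a) := by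
      rw [hlens]; unfold pvLens
      exact PySem.List.sorted_pairwise_rev _ _
    have hnd : lens.Nodup := by
      rw [hlens]; unfold pvLens
      exact (PySem.List.sorted_perm _ _ _).nodup_iff.2 (PySem.Set.nodup_ofList _)
    have : lens.Pairwise (fun a b => b < a) :=
      pv_pairwise_strict (fun x => x) lens hpw hnd (fun a _ b _ h => h)
    exact this.filter P
  -- same members
  have hmem : ∀ j, j ∈ F.map List.length ↔ j ∈ G := by
    intro j
    rw [hF, hG]
    constructor
    · intro hj
      rcases List.mem_map.1 hj with ⟨p, hpF, rfl⟩
      have hpL := (List.mem_filter.1 hpF).1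
      have hpQ := (List.mem_filter.1 hpF).2
      rw [hQ] at hpQ
      simp only [Bool.and_eq_true] at hpQ
      have hpre := hFpre p (hF ▸ hpF)
      have hlen : p.length ≤ n := by rw [hn]; exact hpre.length_le
      have htake : cs.take p.length = p := (List.prefix_iff_eq_take.1 hpre).symm
      refine List.mem_filter.2 ⟨(hlens_mem _).2 ⟨p, (hLmem p).1 hpL, hlen, rfl⟩, ?_⟩
      rw [hP]
      simp only [Bool.and_eq_true]
      refine ⟨?_, ?_⟩
      · rw [htake]
        exact (PySem.Set.contains_iff _ _).2 ((PySem.Set.mem_ofList _ _).2 ((hLmem p).1 hpL))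
      · have : cs.drop p.length ∈ buL := by simpa using hpQ.2
        exact (PySem.Set.contains_iff _ _).2 ((PySem.Set.mem_ofList _ _).2 this)
    · intro hj
      have hjr := (List.mem_filter.1 hj).1
      have hjP := (List.mem_filter.1 hj).2
      rw [hP] at hjP
      simp only [Bool.and_eq_true] at hjP
      have hjn : j ≤ n := by
        rcases (hlens_mem j).1 hjr with ⟨p, -, hle, rfl⟩
        exact hle
      have hkmem : cs.take j ∈ keysL :=
        (PySem.Set.mem_ofList _ _).1 ((PySem.Set.contains_iff _ _).1 hjP.1)
      have hbmem : cs.drop j ∈ buL :=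
        (PySem.Set.mem_ofList _ _).1 ((PySem.Set.contains_iff _ _).1 hjP.2)
      have hlen : (cs.take j).length = j := by simp [List.length_take]; omega
      refine List.mem_map.2 ⟨cs.take j, List.mem_filter.2 ⟨(hLmem _).2 hkmem, ?_⟩, hlen⟩
      rw [hQ]
      simp only [Bool.and_eq_true]
      refine ⟨(PySem.Chars.startswith_iff _ _).2 ?_, ?_⟩
      · exact List.take_prefix j cs
      · rw [hlen]; simpa using hbmem
  -- equal lists
  have hFG : F.map List.length = G := by
    have hmap : (F.map List.length).Pairwise (fun a b => b < a) :=
      List.pairwise_map.2 hFstrict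
    have hFnodup : (F.map List.length).Nodup := hmap.imp (fun h => Nat.ne_of_gt h)
    have hGnodup : G.Nodup := hGstrict.imp (fun h => Nat.ne_of_gt h)
    have hperm : (F.map List.length).Perm G := by
      apply List.perm_of_nodup_nodup_toFinset_eq hFnodup hGnodup
      ext j
      simp only [List.mem_toFinset]
      exact hmem j
    refine hperm.eq_of_pairwise ?_ hmap hGstrict
    intro a b _ _ h1 h2
    omega
  -- conclude
  rw [pvLoopA_eq_filter, pvLoopB_eq, ← hQ, ← hP, ← hF, ← hG, ← hFG]
  cases F with
  | nil => rfl
  | cons p t => simp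

-- proof-only helper: pvResolveB with an abstract continuation for the "$"/"$ " lead
def pvResolveB' (f : List Char → String) (core : List Char) (bu : List String)
    (md : List (String × Int)) : String :=
  if (PySem.Set.ofList (bu.map String.toList)).contains core then f core
  else
    match pvLoopB core (PySem.Set.ofList ((PySem.Dict.ofList md).keys.map String.toList))
        (PySem.Set.ofList (bu.map String.toList))
        (pvLens core (PySem.Set.ofList ((PySem.Dict.ofList md).keys.map String.toList))) with
    | some r => f r
    | none => pvErr core

-- resolution step: A's list-membership + sorted scan = B's set-membership + split scan
theorem pv_resolve_eq (cs : List Char) (bu : List String) (md : List (String × Int))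
    (f : List Char → String) :
    (if (bu.map String.toList).contains cs then f cs
     else
       match pvLoopA cs (bu.map String.toList) (pvSortedPrefixes md) with
       | some pb => f pb
       | none => pvErr cs) = pvResolveB' f cs bu md := by
  unfold pvResolveB'
  rw [pv_contains_ofList, pv_loops_agree]

-- (helper used only to state pv_resolve_eq compactly: pvResolveB with an abstract continuation)
theorem pvResolveB_eq_cont (lead core : List Char) (bu : List String) (md : List (String × Int)) :
    pvResolveB lead core bu md = pvResolveB' (fun r => String.ofList (lead ++ r)) core bu md := rfl

-- ===== VERDICT (by name: the statement is the Claim_ definition above) =====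
theorem process_unit_token_no_paren_spec : Claim_equal_process_unit_token_no_paren := by
  intro token base_units multipliers_dict _
  unfold Spec_process_unit_token_no_paren process_unit_token_no_paren process_unit_token_no_paren_alt
  set tok := PySem.Chars.strip token.toList with htok
  by_cases hd : PySem.Chars.startswith tok ['$']
  · simp only [hd, if_true]
    set rest := PySem.List.slice tok (some 1) none with hrest
    set has_space := PySem.Chars.startswith rest [' '] with hhs
    set core := PySem.Chars.strip rest with hcore
    by_cases he : core = []
    · simp only [he, if_true]
      by_cases h : has_space = true <;> simp [h]
    · simp only [he, if_false]
      rw [pvResolveB_eq_cont, ← pv_resolve_eq]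
      have hf : ∀ r : List Char,
          (if has_space = true then String.ofList ("$ ".toList ++ r)
           else String.ofList ("$".toList ++ r)) =
          String.ofList ((if has_space = true then "$ ".toList else "$".toList) ++ r) := by
        intro r; split <;> rfl
      split
      · rw [hf]
      · split
        · rw [hf]
        · rfl
  · simp only [hd, Bool.false_eq_true, if_false]
    rw [pvResolveB_eq_cont, ← pv_resolve_eq, pv_strip_strip]
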